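-- pv_equiv track=rewrite | github.com/sfluegel05/c3p | learned/o3-mini/triterpenoid_saponin.py | get_fused_ring_clusters
-- ===== SOURCE A (Python) =====
-- def get_fused_ring_clusters(ring_list):
--     """
--     Given a list of rings (each a set of atom indices) create a list of fused ring clusters.
--     Two rings are considered fused if they share ≥2 atoms.
--     We form clusters by merging rings that are connected.
--     """
--     clusters = []
--     for ring in ring_list:
--         # Try to add this ring to an existing cluster if it shares enough atoms.
--         added = False
--         for cluster in clusters:
--             # If ring fuses with any ring in the cluster, merge.
--             if any(len(ring & other) >= 2 for other in cluster):
--                 cluster.append(ring)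
--                 added = True
--                 break
--         if not added:
--             clusters.append([ring])
--     return clusters
-- ===== SOURCE B (Python) =====
-- def get_fused_ring_clusters(ring_list):
--     """
--     Same clustering as A, via an inverted atom -> ring-index map: for each new
--     ring, tally shared-atom counts against earlier rings through the index and
--     join the lowest-numbered matching cluster (= the first cluster A's scan hits).
--     """
--     labels = []          # cluster label of each processed ring
--     rings = []           # processed rings, in order
--     index = {}           # atom -> list of indices of rings containing it
--     n = 0                # number of clusters so far
--     for ring in ring_list:
--         counts = {}
--         for atom in ring:
--             for j in index.get(atom, []):
--                 counts[j] = counts.get(j, 0) + 1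
--         fused = [labels[j] for j, c in counts.items() if c >= 2]
--         lab = min(fused) if fused else n
--         if not fused:
--             n += 1
--         labels.append(lab)
--         rings.append(ring)
--         for atom in ring:
--             index.setdefault(atom, []).append(len(rings) - 1)
--     clusters = [[] for _ in range(n)]
--     for lab, ring in zip(labels, rings):
--         clusters[lab].append(ring)
--     return clusters
-- ===== Notes on version B (the rewrite author's own statement) =====
-- stated objective: alternative
-- what changed: Replaces A's per-ring nested scan over all existing clusters and all their rings (a set intersection per pair, with early break) by an inverted atom-to-ring-index map: shared-atom counts with earlier rings are tallied through the map and the ring joins the lowest-numbered cluster containing a ring sharing >=2 atoms (equal to the first cluster A's ordered scan hits), with clusters materialised from the labels at the end; it trades A's early-exit scans for index bookkeeping, so it is not claimed faster.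
import Mathlib
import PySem

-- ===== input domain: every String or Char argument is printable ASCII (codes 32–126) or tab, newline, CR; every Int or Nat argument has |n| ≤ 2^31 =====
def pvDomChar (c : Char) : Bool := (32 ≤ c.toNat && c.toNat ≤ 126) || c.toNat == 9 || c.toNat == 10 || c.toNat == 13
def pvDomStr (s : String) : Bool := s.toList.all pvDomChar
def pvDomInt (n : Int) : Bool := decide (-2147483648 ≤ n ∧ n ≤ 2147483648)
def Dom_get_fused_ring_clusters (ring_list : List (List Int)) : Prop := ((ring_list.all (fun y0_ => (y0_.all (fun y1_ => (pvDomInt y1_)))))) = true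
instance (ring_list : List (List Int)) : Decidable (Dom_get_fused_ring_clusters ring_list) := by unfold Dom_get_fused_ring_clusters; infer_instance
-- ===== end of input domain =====

-- B replaces A's nested scan of all clusters and their rings per ring by an inverted atom → ring-index
-- map (tally shared-atom counts through the map, join the lowest-numbered fused cluster); objective:
-- alternative (a different algorithm of comparable cost; not claimed faster).

-- ===== PORT A =====
-- 'for cluster in clusters: if any(...): cluster.append(ring); break' — first fusing cluster, or none
def pvAddRing (ring : List Int) : List (List (List Int)) → Option (List (List (List Int)))
  | [] => none
  | cluster :: rest =>
    if cluster.any (fun other => decide (2 ≤ PySem.Set.len (PySem.Set.inter ring other))) then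
      some ((cluster ++ [ring]) :: rest)
    else
      match pvAddRing ring rest with
      | some rest' => some (cluster :: rest')
      | none => none

def get_fused_ring_clusters (ring_list : List (List Int)) : List (List (List Int)) :=
  ring_list.foldl (fun clusters ring =>
    match pvAddRing ring clusters with
    | some clusters' => clusters'
    | none => clusters ++ [[ring]]) []

-- ===== PORT B =====
-- counts = {}; for atom in ring: for j in index.get(atom, []): counts[j] = counts.get(j, 0) + 1
def pvCountShared (index : PySem.Dict Int (List Int)) (ring : List Int) : PySem.Dict Int Int :=
  ring.foldl (fun counts atom =>
      (index.getD atom []).foldl (fun c j => c.insert j (c.getD j 0 + 1)) counts)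
    PySem.Dict.empty

-- one iteration of B's main loop; state = (labels, rings, index, n)
def pvAltStep (st : List Int × List (List Int) × PySem.Dict Int (List Int) × Int)
    (ring : List Int) : List Int × List (List Int) × PySem.Dict Int (List Int) × Int :=
  let labels := st.1
  let rings := st.2.1
  let index := st.2.2.1
  let n := st.2.2.2
  let counts := pvCountShared index ring
  -- fused = [labels[j] for j, c in counts.items() if c >= 2]
  let fused : List Int := counts.items.foldl
    (fun acc p => if 2 ≤ p.2 then acc ++ [PySem.List.pyGetD labels p.1 0] else acc) []
  -- lab = min(fused) if fused else n;  if not fused: n += 1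
  let lab := match PySem.List.min? fused (fun x => x) with
    | some m => m
    | none => n
  let n' := if fused = [] then n + 1 else n
  let labels' := labels ++ [lab]
  let rings' := rings ++ [ring]
  -- for atom in ring: index.setdefault(atom, []).append(len(rings) - 1)
  let index' := ring.foldl (fun d atom => d.modify atom [] (· ++ [(rings'.length : Int) - 1])) index
  (labels', rings', index', n')

-- clusters = [[] for _ in range(n)]; for lab, ring in zip(labels, rings): clusters[lab].append(ring)
def pvBuildClusters (labels : List Int) (rings : List (List Int)) (n : Int) : List (List (List Int)) :=
  (labels.zip rings).foldl
    (fun clusters p => PySem.List.pySetD clusters p.1 (PySem.List.pyGetD clusters p.1 [] ++ [p.2]))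
    (List.replicate n.toNat [])

def get_fused_ring_clusters_alt (ring_list : List (List Int)) : List (List (List Int)) :=
  let st := ring_list.foldl pvAltStep ([], [], PySem.Dict.empty, 0)
  pvBuildClusters st.1 st.2.1 st.2.2.2

-- ===== PRECONDITION & SPEC =====
-- Each ring is a Python set of atom indices; its List Int encoding therefore has no duplicate
-- elements. Pre_ states exactly this representation invariant (every real input satisfies it);
-- a list with duplicated atoms encodes no Python set, so nothing is excluded that A runs on.
def Pre_get_fused_ring_clusters (ring_list : List (List Int)) : Prop :=
  ∀ r ∈ ring_list, r.Nodup

instance (ring_list : List (List Int)) : Decidable (Pre_get_fused_ring_clusters ring_list) := by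
  unfold Pre_get_fused_ring_clusters; infer_instance

def pvWitness_get_fused_ring_clusters : List (List Int) := [[1, 2, 3], [2, 3, 7], [9, 10]]

def Spec_get_fused_ring_clusters (ring_list : List (List Int)) (out : List (List (List Int))) : Prop :=
  out = get_fused_ring_clusters_alt ring_list

instance (ring_list : List (List Int)) (out : List (List (List Int))) : Decidable (Spec_get_fused_ring_clusters ring_list out) := by
  unfold Spec_get_fused_ring_clusters; infer_instance

-- ===== CLAIM (what is proved, stated in full; the proofs are below) =====
def Claim_equal_get_fused_ring_clusters : Prop := ∀ (ring_list : List (List Int)), Dom_get_fused_ring_clusters ring_list → Pre_get_fused_ring_clusters ring_list → Spec_get_fused_ring_clusters ring_list (get_fused_ring_clusters ring_list)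

-- ===== LEMMAS AND PROOFS =====

-- rings selected from (label, ring) pairs carrying a given label
def pvSel (pairs : List (Int × List Int)) (lab : Int) : List (List Int) :=
  pairs.filterMap (fun p => if p.1 = lab then some p.2 else none)

-- A's cluster list, expressed through B's labels
def pvGroups (labels : List Int) (rings : List (List Int)) (n : Int) : List (List (List Int)) :=
  (List.range n.toNat).map (fun lab => pvSel (labels.zip rings) (Nat.cast lab : Int))

-- intended value of index[atom]
def pvMemIdx (rings : List (List Int)) (atom : Int) : List Int :=
  ((List.range rings.length).filter (fun j => decide (atom ∈ rings.getD j []))).map (Nat.cast : Nat → Int)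

-- the fusing test both programs use
def pvFuse (ring other : List Int) : Bool :=
  decide (2 ≤ PySem.Set.len (PySem.Set.inter ring other))

-- the invariant tying A's clusters to B's state
def pvInv (clusters : List (List (List Int)))
    (st : List Int × List (List Int) × PySem.Dict Int (List Int) × Int) : Prop :=
  st.1.length = st.2.1.length ∧
  (∀ r ∈ st.2.1, r.Nodup) ∧
  0 ≤ st.2.2.2 ∧
  (∀ l ∈ st.1, 0 ≤ l ∧ l < st.2.2.2) ∧
  clusters = pvGroups st.1 st.2.1 st.2.2.2 ∧
  (∀ atom, st.2.2.1.getD atom [] = pvMemIdx st.2.1 atom)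

theorem pvCounts_getD (ring : List Int) (index : PySem.Dict Int (List Int))
    (d : PySem.Dict Int Int) (v : Int) :
    (ring.foldl (fun c atom => (index.getD atom []).foldl (fun c j => c.insert j (c.getD j 0 + 1)) c) d).getD v 0
      = d.getD v 0 + ((ring.map (fun a => ((index.getD a []).count v : Int))).sum) := by
  induction ring generalizing d with
  | nil => simp
  | cons a t ih =>
    simp only [List.foldl_cons, List.map_cons, List.sum_cons]
    rw [ih, PySem.Dict.getD_foldl_insert_add_one]
    ring

theorem pvCounts_keys_mem (ring : List Int) (index : PySem.Dict Int (List Int))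
    (d : PySem.Dict Int Int) (v : Int) :
    (v ∈ (ring.foldl (fun c atom => (index.getD atom []).foldl (fun c j => c.insert j (c.getD j 0 + 1)) c) d).keys)
      ↔ v ∈ d.keys ∨ ∃ a ∈ ring, v ∈ index.getD a [] := by
  induction ring generalizing d with
  | nil => simp
  | cons a t ih =>
    simp only [List.foldl_cons, List.mem_cons]
    rw [ih]
    have hk := PySem.Dict.keys_foldl_insert (index.getD a []) (fun c j => c.getD j 0 + 1) d
    constructor
    · rintro (h | ⟨b, hb, hv⟩)
      · rw [hk] at h
        rcases (PySem.Set.mem_update _ _ _).1 h with h | h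
        · exact Or.inl h
        · exact Or.inr ⟨a, Or.inl rfl, h⟩
      · exact Or.inr ⟨b, Or.inr hb, hv⟩
    · rintro (h | ⟨b, (rfl | hb), hv⟩)
      · exact Or.inl (by rw [hk]; exact (PySem.Set.mem_update _ _ _).2 (Or.inl h))
      · exact Or.inl (by rw [hk]; exact (PySem.Set.mem_update _ _ _).2 (Or.inr hv))
      · exact Or.inr ⟨b, hb, hv⟩

theorem pvCounts_keys_nodup (ring : List Int) (index : PySem.Dict Int (List Int))
    (d : PySem.Dict Int Int) (h : d.keys.Nodup) :
    (ring.foldl (fun c atom => (index.getD atom []).foldl (fun c j => c.insert j (c.getD j 0 + 1)) c) d).keys.Nodup := by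
  induction ring generalizing d with
  | nil => exact h
  | cons a t ih =>
    simp only [List.foldl_cons]
    exact ih _ (PySem.Dict.nodup_keys_foldl_insert _ _ _ h)

theorem pvMemIdx_mem (rings : List (List Int)) (atom v : Int) :
    v ∈ pvMemIdx rings atom ↔ ∃ jn : Nat, v = (jn : Int) ∧ jn < rings.length ∧ atom ∈ rings.getD jn [] := by
  unfold pvMemIdx
  rw [List.mem_map]
  constructor
  · rintro ⟨j, hj, rfl⟩
    rw [List.mem_filter, List.mem_range] at hj
    exact ⟨j, by simp, hj.1, by simpa using hj.2⟩
  · rintro ⟨j, rfl, hj, hm⟩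
    exact ⟨j, by rw [List.mem_filter, List.mem_range]; exact ⟨hj, by simpa using hm⟩, by simp⟩

theorem pvMemIdx_nodup (rings : List (List Int)) (atom : Int) : (pvMemIdx rings atom).Nodup := by
  unfold pvMemIdx
  exact ((List.nodup_range.filter _).map (fun a b h => by
    simpa using congrArg Int.toNat h))

theorem pvMemIdx_count (rings : List (List Int)) (atom : Int) (jn : Nat) :
    ((pvMemIdx rings atom).count ((jn : Int)) : Int)
      = if jn < rings.length ∧ atom ∈ rings.getD jn [] then 1 else 0 := by
  by_cases h : jn < rings.length ∧ atom ∈ rings.getD jn []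
  · have hm : ((jn : Int)) ∈ pvMemIdx rings atom := (pvMemIdx_mem _ _ _).2 ⟨jn, rfl, h.1, h.2⟩
    rw [if_pos h]
    exact_mod_cast congrArg (Nat.cast : Nat → Int)
      (List.count_eq_one_of_mem (pvMemIdx_nodup rings atom) hm)
  · rw [if_neg h]
    have hm : ((jn : Int)) ∉ pvMemIdx rings atom := by
      intro hmem
      rcases (pvMemIdx_mem _ _ _).1 hmem with ⟨j, hj, hlt, hmem2⟩
      have hjj : j = jn := by exact_mod_cast hj.symm
      subst hjj; exact h ⟨hlt, hmem2⟩
    simp [List.count_eq_zero_of_not_mem hm]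

theorem pvMemIdx_snoc (rings : List (List Int)) (ring : List Int) (atom : Int) :
    pvMemIdx (rings ++ [ring]) atom
      = pvMemIdx rings atom ++ (if atom ∈ ring then [((rings.length : Int))] else []) := by
  unfold pvMemIdx
  have hlen : (rings ++ [ring]).length = rings.length + 1 := by simp
  rw [hlen, List.range_succ, List.filter_append, List.map_append]
  have h1 : ∀ j ∈ List.range rings.length,
      (decide (atom ∈ (rings ++ [ring]).getD j [])) = (decide (atom ∈ rings.getD j [])) := by
    intro j hj
    rw [List.mem_range] at hj
    rw [List.getD_append _ _ _ _ hj]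
  rw [List.filter_congr h1]
  congr 1
  have h2 : (rings ++ [ring]).getD rings.length [] = ring := by
    simp [List.getD_eq_getElem?_getD]
  by_cases hm : atom ∈ ring
  · simp [h2, hm]
  · simp [h2, hm]

theorem pvSumIte (l : List Int) (p : Int → Bool) :
    (l.map (fun a => if p a then (1 : Int) else 0)).sum = ((l.filter p).length : Int) := by
  induction l with
  | nil => simp
  | cons a t ih =>
    by_cases h : p a
    · simp [h, ih]; push_cast; ring
    · simp [h, ih]

-- counts[j] = |ring ∩ rings[j]| for j < len(rings)
theorem pvCounts_val (ring : List Int) (index : PySem.Dict Int (List Int))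
    (rings : List (List Int)) (hidx : ∀ atom, index.getD atom [] = pvMemIdx rings atom)
    (jn : Nat) (hj : jn < rings.length) :
    (pvCountShared index ring).getD ((jn : Int)) 0
      = (((ring.filter (fun a => (rings.getD jn []).contains a)).length : Int)) := by
  unfold pvCountShared
  rw [pvCounts_getD, PySem.Dict.getD_empty, zero_add]
  have hcongr : ∀ a ∈ ring, ((index.getD a []).count ((jn : Int)) : Int)
      = if (rings.getD jn []).contains a then (1 : Int) else 0 := by
    intro a _
    rw [hidx a, pvMemIdx_count]
    by_cases hm : a ∈ rings.getD jn []
    · rw [if_pos ⟨hj, hm⟩, if_pos (by simpa using hm)]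
    · rw [if_neg (by tauto), if_neg (by simpa using hm)]
  rw [List.map_congr_left hcongr, pvSumIte]

theorem pvCounts_mem_keys (ring : List Int) (index : PySem.Dict Int (List Int))
    (rings : List (List Int)) (hidx : ∀ atom, index.getD atom [] = pvMemIdx rings atom) (v : Int) :
    v ∈ (pvCountShared index ring).keys
      ↔ ∃ jn : Nat, v = (jn : Int) ∧ jn < rings.length ∧ ∃ a ∈ ring, a ∈ rings.getD jn [] := by
  unfold pvCountShared
  rw [pvCounts_keys_mem]
  rw [PySem.Dict.keys_empty]
  simp only [List.not_mem_nil, false_or]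
  constructor
  · rintro ⟨a, ha, hv⟩
    rw [hidx a] at hv
    rcases (pvMemIdx_mem _ _ _).1 hv with ⟨jn, rfl, hlt, hm⟩
    exact ⟨jn, rfl, hlt, a, ha, hm⟩
  · rintro ⟨jn, rfl, hlt, a, ha, hm⟩
    exact ⟨a, ha, by rw [hidx a]; exact (pvMemIdx_mem _ _ _).2 ⟨jn, rfl, hlt, hm⟩⟩

-- the fusing test as a filter length
theorem pvFuse_eq (ring other : List Int) :
    pvFuse ring other = decide (2 ≤ ((ring.filter (fun a => other.contains a)).length : Int)) := by
  rfl

-- membership in B's fused list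
theorem pvFused_mem (ring : List Int) (index : PySem.Dict Int (List Int))
    (labels : List Int) (rings : List (List Int))
    (hidx : ∀ atom, index.getD atom [] = pvMemIdx rings atom) (x : Int) :
    (x ∈ (pvCountShared index ring).items.foldl
        (fun acc p => if 2 ≤ p.2 then acc ++ [PySem.List.pyGetD labels p.1 0] else acc) [])
      ↔ ∃ jn, jn < rings.length ∧ pvFuse ring (rings.getD jn []) = true ∧ x = labels.getD jn 0 := by
  have hnd : (pvCountShared index ring).keys.Nodup := by
    unfold pvCountShared
    exact pvCounts_keys_nodup ring index PySem.Dict.empty (by rw [PySem.Dict.keys_empty]; exact List.nodup_nil)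
  rw [PySem.List.foldl_append_ite]
  rw [List.nil_append, List.mem_map]
  constructor
  · rintro ⟨p, hp, rfl⟩
    rw [List.mem_filter, decide_eq_true_eq] at hp
    obtain ⟨hpi, hp2⟩ := hp
    have hk := PySem.Dict.mem_keys_of_mem_items _ hpi
    rcases (pvCounts_mem_keys ring index rings hidx p.1).1 hk with ⟨jn, hv, hlt, -⟩
    have hval : (pvCountShared index ring).getD p.1 0 = p.2 :=
      PySem.Dict.getD_of_mem_items _ hpi hnd 0
    refine ⟨jn, hlt, ?_, ?_⟩
    · rw [pvFuse_eq, decide_eq_true_eq]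
      rw [← pvCounts_val ring index rings hidx jn hlt, ← hv, hval]
      exact hp2
    · rw [hv, PySem.List.pyGetD_natCast]
  · rintro ⟨jn, hlt, hfuse, rfl⟩
    rw [pvFuse_eq, decide_eq_true_eq] at hfuse
    have hcnt := pvCounts_val ring index rings hidx jn hlt
    have hpos : ∃ a ∈ ring, a ∈ rings.getD jn [] := by
      have hlp : 0 < (ring.filter (fun a => (rings.getD jn []).contains a)).length := by
        omega
      rcases List.exists_mem_of_length_pos hlp with ⟨a, ha⟩
      rw [List.mem_filter] at ha
      exact ⟨a, ha.1, by simpa using ha.2⟩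
    have hk : ((jn : Int)) ∈ (pvCountShared index ring).keys :=
      (pvCounts_mem_keys ring index rings hidx _).2 ⟨jn, rfl, hlt, hpos⟩
    rcases List.mem_map.1 hk with ⟨p, hpi, hp1⟩
    have hval : (pvCountShared index ring).getD p.1 0 = p.2 :=
      PySem.Dict.getD_of_mem_items _ hpi hnd 0
    refine ⟨p, ?_, ?_⟩
    · rw [List.mem_filter, decide_eq_true_eq]
      refine ⟨hpi, ?_⟩
      rw [← hval, hp1, pvCounts_val ring index rings hidx jn hlt]
      exact hfuse
    · rw [hp1, PySem.List.pyGetD_natCast]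

-- A's scan: no cluster fuses
theorem pvAddRing_eq_none (ring : List Int) (cs : List (List (List Int))) :
    pvAddRing ring cs = none ↔ ∀ c ∈ cs, c.any (fun other => pvFuse ring other) = false := by
  induction cs with
  | nil => simp [pvAddRing]
  | cons c rest ih =>
    simp only [pvAddRing]
    by_cases hc : c.any (fun other => decide (2 ≤ PySem.Set.len (PySem.Set.inter ring other))) = true
    · rw [if_pos hc]
      constructor
      · intro h; cases h
      · intro h
        have := h c (List.mem_cons_self ..)
        rw [show (fun other => pvFuse ring other) = (fun other => decide (2 ≤ PySem.Set.len (PySem.Set.inter ring other))) from rfl] at this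
        rw [this] at hc; cases hc
    · rw [if_neg hc]
      cases hrec : pvAddRing ring rest with
      | some rest' =>
        constructor
        · intro h; cases h
        · intro h
          have : pvAddRing ring rest = none := ih.2 (fun c' hc' => h c' (List.mem_cons_of_mem _ hc'))
          rw [hrec] at this; cases this
      | none =>
        constructor
        · intro _ c' hc'
          rcases List.mem_cons.1 hc' with rfl | hc''
          · exact Bool.eq_false_iff.2 (fun hh => hc (by exact hh))
          · exact (ih.1 hrec) c' hc''
        · intro _; rfl

-- A's scan: k is the first fusing cluster
theorem pvAddRing_eq_some (ring : List Int) (cs : List (List (List Int))) (k : Nat)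
    (hk : k < cs.length)
    (hbefore : ∀ i, i < k → (cs.getD i []).any (fun other => pvFuse ring other) = false)
    (hit : (cs.getD k []).any (fun other => pvFuse ring other) = true) :
    pvAddRing ring cs = some (cs.set k (cs.getD k [] ++ [ring])) := by
  induction cs generalizing k with
  | nil => cases hk
  | cons c rest ih =>
    simp only [pvAddRing]
    cases k with
    | zero =>
      have hc : c.any (fun other => decide (2 ≤ PySem.Set.len (PySem.Set.inter ring other))) = true := by
        simpa [pvFuse] using hit
      rw [if_pos hc]
      simp [List.set_cons_zero]
    | succ k' =>
      have hc : c.any (fun other => decide (2 ≤ PySem.Set.len (PySem.Set.inter ring other))) = false := by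
        simpa [pvFuse] using hbefore 0 (Nat.succ_pos _)
      rw [if_neg (by rw [hc]; exact Bool.false_ne_true)]
      have hrec := ih k' (by simpa using hk)
        (fun i hi => by simpa using hbefore (i + 1) (by omega))
        (by simpa using hit)
      rw [hrec]
      rfl

theorem pvSel_mem (labels : List Int) (rings : List (List Int))
    (h : labels.length = rings.length) (lab : Int) (r : List Int) :
    r ∈ pvSel (labels.zip rings) lab
      ↔ ∃ jn, jn < rings.length ∧ labels.getD jn 0 = lab ∧ rings.getD jn [] = r := by
  unfold pvSel
  rw [List.mem_filterMap]
  constructor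
  · rintro ⟨p, hp, hsel⟩
    rcases List.mem_iff_getElem.1 hp with ⟨j, hj, hpj⟩
    rw [List.getElem_zip] at hpj
    by_cases hp1 : p.1 = lab
    · rw [if_pos hp1, Option.some.injEq] at hsel
      have hjr : j < rings.length := by
        have := hj; rw [List.length_zip] at this; omega
      have hjl : j < labels.length := by omega
      refine ⟨j, hjr, ?_, ?_⟩
      · rw [List.getD_eq_getElem labels 0 hjl]
        have : labels[j] = p.1 := by rw [← hpj]
        rw [this, hp1]
      · rw [List.getD_eq_getElem rings [] hjr]
        have : rings[j] = p.2 := by rw [← hpj]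
        rw [this, hsel]
    · rw [if_neg hp1] at hsel; cases hsel
  · rintro ⟨j, hjr, hl, hr⟩
    have hjl : j < labels.length := by omega
    have hjz : j < (labels.zip rings).length := by rw [List.length_zip]; omega
    refine ⟨(labels.zip rings)[j], List.mem_iff_getElem.2 ⟨j, hjz, rfl⟩, ?_⟩
    rw [List.getElem_zip]
    have hl' : labels[j] = lab := by rw [← List.getD_eq_getElem labels 0 hjl]; exact hl
    have hr' : rings[j] = r := by rw [← List.getD_eq_getElem rings [] hjr]; exact hr
    simp [hl', hr']

theorem pvSel_snoc (pairs : List (Int × List Int)) (lab lab' : Int) (ring : List Int) :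
    pvSel (pairs ++ [(lab, ring)]) lab'
      = pvSel pairs lab' ++ (if lab = lab' then [ring] else []) := by
  by_cases h : lab = lab' <;> simp [pvSel, List.filterMap_append, h]

theorem pvGroups_snoc_new (labels : List Int) (rings : List (List Int)) (n : Int)
    (hlen : labels.length = rings.length) (hn : 0 ≤ n)
    (hlab : ∀ l ∈ labels, 0 ≤ l ∧ l < n) (ring : List Int) :
    pvGroups (labels ++ [n]) (rings ++ [ring]) (n + 1)
      = pvGroups labels rings n ++ [[ring]] := by
  unfold pvGroups
  rw [List.zip_append hlen]
  simp only [List.zip_cons_cons, List.zip_nil_right]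
  have hnn : (n + 1).toNat = n.toNat + 1 := by omega
  rw [hnn, List.range_succ, List.map_append]
  congr 1
  · apply List.map_congr_left
    intro lab hl
    rw [List.mem_range] at hl
    rw [pvSel_snoc]
    have hne : n ≠ ((lab : Int)) := by omega
    rw [if_neg hne, List.append_nil]
  · simp only [List.map_cons, List.map_nil]
    congr 1
    rw [pvSel_snoc]
    have h0 : pvSel (labels.zip rings) ((n.toNat : Int)) = [] := by
      unfold pvSel
      rw [List.filterMap_eq_nil_iff]
      intro p hp
      have hp1 := (List.of_mem_zip hp).1
      have hb := (hlab _ hp1).2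
      rw [if_neg (by omega)]
    rw [h0]
    have he : n = ((n.toNat : Int)) := by omega
    rw [if_pos he, List.nil_append]

theorem pvGroups_snoc_join (labels : List Int) (rings : List (List Int)) (n m : Int)
    (hlen : labels.length = rings.length) (hm : 0 ≤ m) (hmn : m < n) (ring : List Int) :
    pvGroups (labels ++ [m]) (rings ++ [ring]) n
      = (pvGroups labels rings n).set m.toNat (pvSel (labels.zip rings) m ++ [ring]) := by
  unfold pvGroups
  rw [List.zip_append hlen]
  simp only [List.zip_cons_cons, List.zip_nil_right]
  apply List.ext_getElem
  · simp
  · intro i h1 h2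
    rw [List.length_map, List.length_range] at h1
    simp only [List.getElem_map, List.getElem_range]
    rw [pvSel_snoc]
    by_cases hi : i = m.toNat
    · subst hi
      rw [List.getElem_set_self]
      have hm' : m = ((m.toNat : Int)) := by omega
      rw [if_pos hm', ← hm']
    · rw [List.getElem_set_ne (by omega)]
      simp only [List.getElem_map, List.getElem_range]
      have hne : m ≠ ((i : Int)) := by omega
      rw [if_neg hne, List.append_nil]

-- the new index after B's update loop
theorem pvIndex_update (ring : List Int) (hring : ring.Nodup)
    (index : PySem.Dict Int (List Int)) (rings : List (List Int))
    (hidx : ∀ atom, index.getD atom [] = pvMemIdx rings atom) (atom : Int) :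
    (ring.foldl (fun d a => d.modify a [] (· ++ [((rings.length + 1 : Nat) : Int) - 1])) index).getD atom []
      = pvMemIdx (rings ++ [ring]) atom := by
  have hfold : ring.foldl (fun d a => d.modify a [] (· ++ [((rings.length + 1 : Nat) : Int) - 1])) index
      = (ring.map (fun a => (a, ((rings.length + 1 : Nat) : Int) - 1))).foldl
          (fun d p => d.modify p.1 [] (· ++ [p.2])) index := by
    rw [List.foldl_map]
  rw [hfold, PySem.Dict.getD_foldl_modify_append, hidx atom, pvMemIdx_snoc]
  congr 1
  have hv : ((rings.length + 1 : Nat) : Int) - 1 = ((rings.length : Nat) : Int) := by push_cast; ring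
  rw [List.filter_map, List.map_map]
  have hps : ((fun p => p.1 == atom) ∘ (fun a => (a, ((rings.length + 1 : Nat) : Int) - 1)))
      = (fun a => a == atom) := rfl
  rw [hps, List.filter_beq]
  by_cases hm : atom ∈ ring
  · rw [List.count_eq_one_of_mem hring hm]
    simp [hm, hv]
  · rw [List.count_eq_zero_of_not_mem hm]
    simp [hm]

-- B's final reconstruction loop
theorem pvBuildAux (pairs : List (Int × List Int)) (acc : List (List (List Int)))
    (h : ∀ p ∈ pairs, 0 ≤ p.1 ∧ p.1 < (acc.length : Int)) :
    pairs.foldl (fun cl p => PySem.List.pySetD cl p.1 (PySem.List.pyGetD cl p.1 [] ++ [p.2])) acc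
      = (List.range acc.length).map (fun lab => acc.getD lab [] ++ pvSel pairs ((lab : Int))) := by
  induction pairs generalizing acc with
  | nil =>
    simp only [List.foldl_nil]
    apply List.ext_getElem
    · simp
    · intro i h1 h2
      simp only [List.getElem_map, List.getElem_range, pvSel, List.filterMap_nil, List.append_nil]
      rw [List.getD_eq_getElem acc [] h1]
  | cons p rest ih =>
    obtain ⟨hp0, hplt⟩ := h p (List.mem_cons_self ..)
    have hj : p.1 = ((p.1.toNat : Nat) : Int) := by omega
    have hjlt : p.1.toNat < acc.length := by omega
    rw [List.foldl_cons]
    have hset : PySem.List.pySetD acc p.1 (PySem.List.pyGetD acc p.1 [] ++ [p.2])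
        = acc.set p.1.toNat (acc.getD p.1.toNat [] ++ [p.2]) := by
      conv_lhs => rw [hj]
      rw [PySem.List.pySetD_natCast, PySem.List.pyGetD_natCast]
    rw [hset]
    rw [ih _ (by intro q hq; have := h q (List.mem_cons_of_mem _ hq); simpa using this)]
    apply List.ext_getElem
    · simp
    · intro i h1 h2
      rw [List.length_map, List.length_range, List.length_set] at h1
      simp only [List.getElem_map, List.getElem_range]
      have hselc : pvSel (p :: rest) ((i : Int))
          = (if p.1 = ((i : Int)) then [p.2] else []) ++ pvSel rest ((i : Int)) := by
        unfold pvSel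
        rw [List.filterMap_cons]
        by_cases hpi : p.1 = ((i : Int)) <;> simp [hpi]
      rw [hselc]
      by_cases hi : i = p.1.toNat
      · subst hi
        rw [List.getD_eq_getElem _ [] (by simpa using hjlt), List.getElem_set_self]
        rw [if_pos (by omega)]
        rw [List.getD_eq_getElem _ [] hjlt]
        simp
      · rw [List.getD_eq_getElem _ [] (by simpa using h1), List.getElem_set_ne (by omega)]
        rw [if_neg (by omega), List.nil_append, List.getD_eq_getElem _ [] h1]

theorem pvBuild_eq_groups (labels : List Int) (rings : List (List Int)) (n : Int)
    (hn : 0 ≤ n) (hlab : ∀ l ∈ labels, 0 ≤ l ∧ l < n) :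
    pvBuildClusters labels rings n = pvGroups labels rings n := by
  unfold pvBuildClusters pvGroups
  rw [pvBuildAux _ _ (by
    intro q hq
    have hq1 := (List.of_mem_zip hq).1
    have := hlab _ hq1
    simp only [List.length_replicate]
    omega)]
  rw [List.length_replicate]
  apply List.map_congr_left
  intro lab hl
  rw [List.mem_range] at hl
  rw [List.getD_eq_getElem _ [] (by simpa using hl)]
  simp

theorem pvGroups_length (labels : List Int) (rings : List (List Int)) (n : Int) :
    (pvGroups labels rings n).length = n.toNat := by
  simp [pvGroups]

theorem pvGroups_getD (labels : List Int) (rings : List (List Int)) (n : Int)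
    (i : Nat) (hi : i < n.toNat) :
    (pvGroups labels rings n).getD i [] = pvSel (labels.zip rings) ((i : Int)) := by
  unfold pvGroups
  rw [List.getD_eq_getElem _ [] (by simpa using hi)]
  simp

-- one step preserves the invariant
theorem pvStep (clusters : List (List (List Int)))
    (st : List Int × List (List Int) × PySem.Dict Int (List Int) × Int)
    (ring : List Int) (hring : ring.Nodup) (hinv : pvInv clusters st) :
    pvInv (match pvAddRing ring clusters with
           | some clusters' => clusters'
           | none => clusters ++ [[ring]]) (pvAltStep st ring) := by
  obtain ⟨labels, rings, index, n⟩ := st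
  unfold pvInv at hinv ⊢
  obtain ⟨hlen, hnodups, hn, hlab, hcl, hidx⟩ := hinv
  simp only at hlen hnodups hn hlab hcl hidx
  subst hcl
  dsimp only [pvAltStep]
  set fused := (pvCountShared index ring).items.foldl
      (fun acc p => if 2 ≤ p.2 then acc ++ [PySem.List.pyGetD labels p.1 0] else acc) ([] : List Int) with hfa
  have hmemF : ∀ x, x ∈ fused ↔ ∃ jn, jn < rings.length ∧
      pvFuse ring (rings.getD jn []) = true ∧ x = labels.getD jn 0 :=
    fun x => pvFused_mem ring index labels rings hidx x
  have hidx' : ∀ atom,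
      (ring.foldl (fun d atom => d.modify atom [] (· ++ [(((rings ++ [ring]).length : Nat) : Int) - 1])) index).getD atom []
        = pvMemIdx (rings ++ [ring]) atom := by
    intro atom
    have := pvIndex_update ring hring index rings hidx atom
    simpa using this
  by_cases hF : fused = []
  · have hnone : pvAddRing ring (pvGroups labels rings n) = none := by
      rw [pvAddRing_eq_none]
      intro c hc
      rcases List.mem_map.1 hc with ⟨lab, _, rfl⟩
      apply Bool.eq_false_iff.2
      intro hany
      rcases List.any_eq_true.1 hany with ⟨r, hr, hfuse⟩
      rcases (pvSel_mem labels rings hlen _ r).1 hr with ⟨jn, hjn, hlabeq, hreq⟩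
      have hmem : labels.getD jn 0 ∈ fused :=
        (hmemF _).2 ⟨jn, hjn, by rw [hreq]; exact hfuse, rfl⟩
      rw [hF] at hmem
      exact absurd hmem (List.not_mem_nil)
    rw [hnone]
    have hmin : PySem.List.min? fused (fun x => x) = none :=
      (PySem.List.min?_eq_none_iff _ _).2 hF
    rw [hmin, if_pos hF]
    dsimp only
    refine ⟨by simp [hlen], ?_, by omega, ?_, ?_, hidx'⟩
    · intro r hr
      rcases List.mem_append.1 hr with h | h
      · exact hnodups r h
      · rw [List.mem_singleton.1 h]; exact hring
    · intro l hl
      rcases List.mem_append.1 hl with h | h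
      · have := hlab l h; exact ⟨this.1, by omega⟩
      · rw [List.mem_singleton.1 h]; exact ⟨hn, by omega⟩
    · exact (pvGroups_snoc_new labels rings n hlen hn hlab ring).symm
  · obtain ⟨m, hminm⟩ : ∃ m, PySem.List.min? fused (fun x => x) = some m := by
      cases hmin : PySem.List.min? fused (fun x => x) with
      | none => exact absurd ((PySem.List.min?_eq_none_iff _ _).1 hmin) hF
      | some m => exact ⟨m, rfl⟩
    rw [hminm, if_neg hF]
    dsimp only
    have hmF : m ∈ fused := PySem.List.min?_mem hminm
    have hmin' : ∀ y ∈ fused, m ≤ y := PySem.List.min?_isMin hminm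
    rcases (hmemF m).1 hmF with ⟨j0, hj0, hj0f, hj0eq⟩
    have hj0l : j0 < labels.length := by omega
    have hmmem : m ∈ labels := by
      rw [hj0eq, List.getD_eq_getElem labels 0 hj0l]
      exact List.getElem_mem _
    obtain ⟨hm0, hmn⟩ := hlab m hmmem
    have hk : m.toNat < n.toNat := by omega
    have hsome : pvAddRing ring (pvGroups labels rings n)
        = some ((pvGroups labels rings n).set m.toNat
            ((pvGroups labels rings n).getD m.toNat [] ++ [ring])) := by
      apply pvAddRing_eq_some
      · rw [pvGroups_length]; exact hk
      · intro i hi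
        rw [pvGroups_getD labels rings n i (by omega)]
        apply Bool.eq_false_iff.2
        intro hany
        rcases List.any_eq_true.1 hany with ⟨r, hr, hfuse⟩
        rcases (pvSel_mem labels rings hlen _ r).1 hr with ⟨jn, hjn, hlabeq, hreq⟩
        have hmem : labels.getD jn 0 ∈ fused :=
          (hmemF _).2 ⟨jn, hjn, by rw [hreq]; exact hfuse, rfl⟩
        have hle := hmin' _ hmem
        rw [hlabeq] at hle
        omega
      · rw [pvGroups_getD labels rings n m.toNat hk]
        apply List.any_eq_true.2
        refine ⟨rings.getD j0 [], ?_, hj0f⟩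
        apply (pvSel_mem labels rings hlen _ _).2
        exact ⟨j0, hj0, by rw [← hj0eq]; omega, rfl⟩
    rw [hsome]
    dsimp only
    refine ⟨by simp [hlen], ?_, hn, ?_, ?_, hidx'⟩
    · intro r hr
      rcases List.mem_append.1 hr with h | h
      · exact hnodups r h
      · rw [List.mem_singleton.1 h]; exact hring
    · intro l hl
      rcases List.mem_append.1 hl with h | h
      · exact hlab l h
      · rw [List.mem_singleton.1 h]; exact ⟨hm0, hmn⟩
    · rw [pvGroups_getD labels rings n m.toNat hk]
      rw [show ((m.toNat : Nat) : Int) = m by omega]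
      exact (pvGroups_snoc_join labels rings n m hlen hm0 hmn ring).symm

theorem pvFold (rs : List (List Int)) (clusters : List (List (List Int)))
    (st : List Int × List (List Int) × PySem.Dict Int (List Int) × Int)
    (hrs : ∀ r ∈ rs, r.Nodup) (hinv : pvInv clusters st) :
    pvInv (rs.foldl (fun clusters ring =>
            match pvAddRing ring clusters with
            | some clusters' => clusters'
            | none => clusters ++ [[ring]]) clusters)
          (rs.foldl pvAltStep st) := by
  induction rs generalizing clusters st with
  | nil => exact hinv
  | cons r rest ih =>
    rw [List.foldl_cons, List.foldl_cons]
    exact ih _ _ (fun r' hr' => hrs r' (List.mem_cons_of_mem _ hr'))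
      (pvStep clusters st r (hrs r (List.mem_cons_self ..)) hinv)

-- ===== VERDICT (by name: the statement is the Claim_ definition above) =====
theorem get_fused_ring_clusters_spec : Claim_equal_get_fused_ring_clusters := by
  intro ring_list _ hpre
  unfold Spec_get_fused_ring_clusters get_fused_ring_clusters get_fused_ring_clusters_alt
  have h0 : pvInv [] ([], [], PySem.Dict.empty, 0) := by
    refine ⟨rfl, by simp, le_refl 0, by simp, rfl, ?_⟩
    intro atom
    rw [PySem.Dict.getD_empty]
    rfl
  have h := pvFold ring_list [] ([], [], PySem.Dict.empty, 0) hpre h0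
  obtain ⟨hlen, hnd, hn, hlab, hcl, hidx⟩ := h
  rw [hcl, pvBuild_eq_groups _ _ _ hn hlab]
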